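-- pv_equiv track=rewrite | github.com/lemon-lime-honey/baekjoon | 프로그래머스/unrated/181894. 2의 영역/2의 영역.py | solution
-- ===== SOURCE A (Python) =====
-- def solution(arr):
--     answer = list()
--     for i in range(len(arr)):
--         if arr[i] == 2:
--             answer = arr[i:]
--             break
--     else:
--         return [-1]
--     while answer and answer[-1] != 2:
--         answer.pop()
--     return answer
-- ===== SOURCE B (Python) =====
-- def solution(arr):
--     try:
--         first = arr.index(2)
--     except ValueError:
--         return [-1]
--     last = len(arr) - 1 - arr[::-1].index(2)
--     return arr[first:last + 1]
-- ===== Notes on version B (the rewrite author's own statement) =====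
-- stated objective: simpler
-- what changed: B computes the first index of 2 with arr.index and the last with a reversed index, then returns one slice, replacing A's forward scan plus repeated pop() from the end.
import Mathlib
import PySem

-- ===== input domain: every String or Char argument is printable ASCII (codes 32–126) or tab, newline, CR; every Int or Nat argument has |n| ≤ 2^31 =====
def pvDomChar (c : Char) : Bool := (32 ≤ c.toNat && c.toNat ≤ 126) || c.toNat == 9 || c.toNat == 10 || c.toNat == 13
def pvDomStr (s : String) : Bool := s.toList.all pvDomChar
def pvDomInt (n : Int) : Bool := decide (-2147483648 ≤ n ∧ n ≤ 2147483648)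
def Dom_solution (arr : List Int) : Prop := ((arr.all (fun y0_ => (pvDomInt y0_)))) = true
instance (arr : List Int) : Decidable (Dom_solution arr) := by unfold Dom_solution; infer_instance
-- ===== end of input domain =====

-- B computes both boundary indices and slices once; A scans forward for the first 2 and then pops from the end.

-- ===== PORT A =====
-- the 'for i in range(len(arr))' scan: returns arr[i:] at the first 2, none if the loop falls through
def solutionFind : List Int → Option (List Int)
  | [] => none
  | x :: xs => if x = 2 then some (x :: xs) else solutionFind xs

-- the 'while answer and answer[-1] != 2: answer.pop()' loop
def solutionPop (l : List Int) : List Int :=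
  match h : l.getLast? with
  | none => l
  | some x => if x = 2 then l else solutionPop l.dropLast
termination_by l.length
decreasing_by
  have : l ≠ [] := by intro he; simp [he] at h
  simpa [List.length_dropLast] using Nat.sub_lt (List.length_pos_iff.mpr this) one_pos

def solution (arr : List Int) : List Int :=
  match solutionFind arr with
  | none => [-1]
  | some answer => solutionPop answer

-- ===== PORT B =====
def solution_alt (arr : List Int) : List Int :=
  match PySem.List.index? arr 2 with
  | none => [-1]                      -- except ValueError
  | some first =>
    match PySem.List.index? arr.reverse 2 with  -- arr[::-1].index(2); arr.reverse per slice?_none_none_neg_one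
    | none => []                      -- unreachable: 2 ∈ arr (Python would raise here)
    | some r =>
      let last : Int := (arr.length : Int) - 1 - (r : Int)
      PySem.List.slice arr (some (first : Int)) (some (last + 1))

-- ===== PRECONDITION & SPEC =====
def Spec_solution (arr : List Int) (out : List Int) : Prop := out = solution_alt arr
instance (arr : List Int) (out : List Int) : Decidable (Spec_solution arr out) := by unfold Spec_solution; infer_instance

-- ===== CLAIM (what is proved, stated in full; the proofs are below) =====
def Claim_equal_solution : Prop := ∀ (arr : List Int), Dom_solution arr → Spec_solution arr (solution arr)

-- ===== LEMMAS AND PROOFS =====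

theorem solutionFind_eq_none (arr : List Int) (h : 2 ∉ arr) : solutionFind arr = none := by
  induction arr with
  | nil => rfl
  | cons x xs ih =>
    simp only [List.mem_cons, not_or] at h
    simp [solutionFind, Ne.symm h.1, ih h.2]

theorem solutionFind_eq_some (pre suf : List Int) (h : 2 ∉ pre) :
    solutionFind (pre ++ 2 :: suf) = some (2 :: suf) := by
  induction pre with
  | nil => simp [solutionFind]
  | cons x xs ih =>
    simp only [List.mem_cons, not_or] at h
    simpa [solutionFind, Ne.symm h.1] using ih h.2

theorem solutionPop_eq (m t : List Int) (h : 2 ∉ t) :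
    solutionPop (m ++ 2 :: t) = m ++ [2] := by
  induction t using List.reverseRecOn with
  | nil =>
    rw [solutionPop]
    split
    · rfl
    · rename_i x hx
      rw [List.getLast?_concat] at hx
      cases hx
      simp
  | append_singleton ts x ih =>
    simp only [List.mem_append, List.mem_singleton, not_or] at h
    rw [show m ++ 2 :: (ts ++ [x]) = (m ++ 2 :: ts) ++ [x] by simp]
    rw [solutionPop]
    split
    · rename_i hx
      rw [List.getLast?_concat] at hx
      cases hx
    · rename_i y hy
      rw [List.getLast?_concat] at hy
      cases hy
      rw [if_neg (Ne.symm h.2), List.dropLast_concat]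
      exact ih h.1

theorem first_le (pre suf T Q : List Int) (hpre : 2 ∉ pre)
    (harr : pre ++ 2 :: suf = T ++ 2 :: Q) : pre.length ≤ T.length := by
  by_contra hlt
  push_neg at hlt
  have h2 : (T ++ 2 :: Q)[T.length]? = some 2 := by
    rw [List.getElem?_append_right le_rfl]
    simp
  have h3 : (pre ++ 2 :: suf)[T.length]? = some 2 := by rw [harr]; exact h2
  rw [List.getElem?_append_left hlt] at h3
  exact hpre (List.mem_of_getElem? h3)

theorem solution_eq_on (pre suf T Q : List Int) (hpre : 2 ∉ pre) (hQ : 2 ∉ Q)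
    (harr : pre ++ 2 :: suf = T ++ 2 :: Q) :
    solution (pre ++ 2 :: suf) = T.drop pre.length ++ [2] := by
  have hle : pre.length ≤ T.length := first_le pre suf T Q hpre harr
  have hsuf : 2 :: suf = T.drop pre.length ++ 2 :: Q := by
    have := congrArg (List.drop pre.length) harr
    rwa [List.drop_left, List.drop_append_of_le_length hle] at this
  rw [solution, solutionFind_eq_some pre suf hpre]
  show solutionPop (2 :: suf) = T.drop pre.length ++ [2]
  rw [hsuf, solutionPop_eq _ _ hQ]

theorem drop_take_eq (T Q : List Int) (n : Nat) (hn : n ≤ T.length) :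
    (T.drop n ++ 2 :: Q).take (T.length + 1 - n) = T.drop n ++ [2] := by
  have hlen : (T.drop n).length = T.length - n := by simp
  rw [show T.length + 1 - n = (T.drop n).length + 1 by omega]
  rw [List.take_append]
  simp

-- ===== VERDICT (by name: the statement is the Claim_ definition above) =====
theorem solution_spec : Claim_equal_solution := by
  intro arr _
  unfold Spec_solution solution_alt
  by_cases hmem : 2 ∈ arr
  · obtain ⟨first, hfirst⟩ := (PySem.List.index?_isSome_iff arr 2).mpr hmem |> Option.isSome_iff_exists.mp
    obtain ⟨r, hr⟩ := (PySem.List.index?_isSome_iff arr.reverse 2).mpr (by simpa using hmem) |> Option.isSome_iff_exists.mp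
    rw [hfirst, hr]
    obtain ⟨pre, suf, harr1, hprelen, hpre⟩ := (PySem.List.index?_eq_some_iff _ _ _).mp hfirst
    obtain ⟨q, t, hrev, hqlen, hq⟩ := (PySem.List.index?_eq_some_iff _ _ _).mp hr
    have harr2 : arr = t.reverse ++ 2 :: q.reverse := by
      have := congrArg List.reverse hrev
      simpa using this
    have hlen : arr.length = t.length + 1 + q.length := by rw [harr2]; simp; omega
    have hQ : (2 : Int) ∉ q.reverse := by simpa using hq
    have hcomb : pre ++ 2 :: suf = t.reverse ++ 2 :: q.reverse := by rw [← harr1, harr2]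
    have hA : solution arr = (t.reverse.drop pre.length ++ [2]) := by
      rw [show arr = pre ++ 2 :: suf from harr1]
      exact solution_eq_on pre suf t.reverse q.reverse hpre hQ hcomb
    rw [hA]
    have hrlen : r ≤ arr.length := by omega
    have hb : (arr.length : Int) - 1 - (r : Int) + 1 = ((arr.length - r : Nat) : Int) := by
      push_cast [hrlen]; ring
    show t.reverse.drop pre.length ++ [2] =
      PySem.List.slice arr (some (first : Int)) (some ((arr.length : Int) - 1 - (r : Int) + 1))
    rw [hb, ← hprelen, PySem.List.slice_natCast]
    have hle : pre.length ≤ t.reverse.length := first_le pre suf t.reverse q.reverse hpre hcomb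
    have hdrop : arr.drop pre.length = t.reverse.drop pre.length ++ 2 :: q.reverse := by
      have := congrArg (List.drop pre.length) harr2
      rwa [List.drop_append_of_le_length hle] at this
    have hnr : arr.length - r = t.length + 1 := by omega
    rw [hdrop, hnr]
    have := drop_take_eq t.reverse q.reverse pre.length (by simpa using hle)
    simpa using this.symm
  · rw [(PySem.List.index?_eq_none_iff _ _).mpr hmem]
    rw [solution, solutionFind_eq_none arr hmem]
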